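-- pv_equiv track=rewrite | github.com/raeez/chiral-bar-cobar | compute/lib/local_p1p1_shadow.py | euler_form_mckay
-- ===== SOURCE A (Python) =====
-- from typing import Any, Dict, List, NamedTuple, Optional, Sequence, Tuple
--
-- class McKayQuiverP1P1(NamedTuple):
--     """McKay quiver for C^3/(Z_2 x Z_2).
--
--     4 nodes (representations of Z_2 x Z_2): (0,0), (1,0), (0,1), (1,1)
--     Edges: 3 arrows from each node to each other node (from the 3 coordinate
--     functions x, y, z of C^3), subject to the Z_2 x Z_2 action.
--     """
--     num_nodes: int
--     nodes: List[Tuple[int, int]]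
--     arrows: List[Tuple[Tuple[int, int], Tuple[int, int], str]]
--     dimension_vector: Dict[Tuple[int, int], int]
--
-- def mckay_quiver_z2z2() -> McKayQuiverP1P1:
--     r"""The McKay quiver for Z_2 x Z_2 acting on C^3.
--
--     The group Z_2 x Z_2 = {1, g_1, g_2, g_1 g_2} acts on C^3 = (x,y,z) by:
--         g_1: (x,y,z) -> (-x,-y,z)
--         g_2: (x,y,z) -> (-x,y,-z)
--         g_1 g_2: (x,y,z) -> (x,-y,-z)
--
--     The irreducible representations are the 4 characters:
--         rho_00(g) = 1,  rho_10(g) = (-1)^{a},  rho_01(g) = (-1)^{b},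
--         rho_11(g) = (-1)^{a+b}
--     for g = g_1^a g_2^b.
--
--     The 3 coordinate functions decompose as:
--         x: rho_00 -> rho_10 (weight (1,0) under g_1, g_2)
--         y: rho_00 -> rho_01 (weight (0,1))
--         z: rho_00 -> rho_11 (weight (1,1))
--
--     Wait, let me recompute.  Under g_1: x -> -x, so x has character (-1,1) = rho_10.
--     Under g_2: x -> -x, so x has character (1,-1) under (g_1, g_2)?
--     No: g_1 acts as (-,-,+), g_2 acts as (-,+,-).
--     x picks up (-1) from g_1 and (-1) from g_2, so x has character rho_11.
--     y picks up (-1) from g_1 and (+1) from g_2, so y has character rho_10.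
--     z picks up (+1) from g_1 and (-1) from g_2, so z has character rho_01.
--
--     The arrows of the McKay quiver: for each coordinate direction d in {x,y,z}
--     and each node rho_i, there is an arrow rho_i -> rho_i tensor rho_d.
--
--     So arrows are:
--         x (rho_11): (0,0)->(1,1), (1,0)->(0,1), (0,1)->(1,0), (1,1)->(0,0)
--         y (rho_10): (0,0)->(1,0), (1,0)->(0,0), (0,1)->(1,1), (1,1)->(0,1)
--         z (rho_01): (0,0)->(0,1), (0,1)->(0,0), (1,0)->(1,1), (1,1)->(1,0)
--     """
--     nodes = [(0, 0), (1, 0), (0, 1), (1, 1)]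
--
--     arrows = []
--     # x has character rho_11
--     for a, b in nodes:
--         target = ((a + 1) % 2, (b + 1) % 2)
--         arrows.append(((a, b), target, "x"))
--     # y has character rho_10
--     for a, b in nodes:
--         target = ((a + 1) % 2, b)
--         arrows.append(((a, b), target, "y"))
--     # z has character rho_01
--     for a, b in nodes:
--         target = (a, (b + 1) % 2)
--         arrows.append(((a, b), target, "z"))
--
--     # Dimension vector for n points: all nodes have dimension n
--     dim_vec = {node: 1 for node in nodes}
--
--     return McKayQuiverP1P1(
--         num_nodes=4,
--         nodes=nodes,
--         arrows=arrows,
--         dimension_vector=dim_vec,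
--     )
--
-- def euler_form_mckay(d1: Dict[Tuple[int, int], int],
--                       d2: Dict[Tuple[int, int], int]) -> int:
--     r"""Euler form chi(d1, d2) for the McKay quiver of Z_2 x Z_2.
--
--     chi(d1, d2) = sum_i d1_i * d2_i - sum_{arrows a: i->j} d1_i * d2_j
--
--     This enters the DT partition function via:
--         Z_DT = sum_d (-q)^{sum d_i} / prod_{i} (q)_{d_i} * q^{chi(d,d)/2}
--     """
--     quiver = mckay_quiver_z2z2()
--     # Diagonal: sum d1_i * d2_i
--     diag = sum(d1.get(node, 0) * d2.get(node, 0) for node in quiver.nodes)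
--     # Off-diagonal: arrows
--     off = 0
--     for src, tgt, _ in quiver.arrows:
--         off += d1.get(src, 0) * d2.get(tgt, 0)
--     return diag - off
-- ===== SOURCE B (Python) =====
-- def euler_form_mckay(d1, d2):
--     # Closed form: each node has exactly one arrow to each of the other 3 nodes,
--     # so off = S1*S2 - diag and chi = diag - off = 2*diag - S1*S2.
--     nodes = [(0, 0), (1, 0), (0, 1), (1, 1)]
--     diag = sum(d1.get(n, 0) * d2.get(n, 0) for n in nodes)
--     s1 = sum(d1.get(n, 0) for n in nodes)
--     s2 = sum(d2.get(n, 0) for n in nodes)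
--     return 2 * diag - s1 * s2
-- ===== Notes on version B (the rewrite author's own statement) =====
-- stated objective: simpler
-- what changed: B drops the quiver/arrow construction and iteration entirely and returns the closed form 2*diag - S1*S2 over the four fixed nodes, using the fact that each node has exactly one arrow to each other node so the off-diagonal arrow sum equals S1*S2 - diag.
import Mathlib
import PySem

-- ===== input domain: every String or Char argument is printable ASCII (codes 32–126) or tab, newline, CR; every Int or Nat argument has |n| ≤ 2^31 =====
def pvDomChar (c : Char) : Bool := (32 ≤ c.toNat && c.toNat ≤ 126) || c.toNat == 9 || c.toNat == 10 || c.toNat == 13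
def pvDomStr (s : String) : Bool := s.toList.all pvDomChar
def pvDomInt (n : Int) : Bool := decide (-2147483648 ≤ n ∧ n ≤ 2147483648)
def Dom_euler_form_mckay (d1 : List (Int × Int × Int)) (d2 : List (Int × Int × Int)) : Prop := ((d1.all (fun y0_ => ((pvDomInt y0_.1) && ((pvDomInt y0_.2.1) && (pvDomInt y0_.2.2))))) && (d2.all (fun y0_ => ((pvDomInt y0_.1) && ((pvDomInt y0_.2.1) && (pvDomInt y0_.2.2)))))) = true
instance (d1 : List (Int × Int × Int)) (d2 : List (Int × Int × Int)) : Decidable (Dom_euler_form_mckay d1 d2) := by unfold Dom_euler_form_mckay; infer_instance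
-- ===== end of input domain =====

-- ===== PORT A =====
-- B replaces the quiver/arrow iteration by the closed form 2*diag - S1*S2 (objective: simpler).
-- shared helper: d.get((a,b), 0) on the flattened assoc list (first match, else 0)
def pvGetN (d : List (Int × Int × Int)) (k : Int × Int) : Int :=
  match d with
  | [] => 0
  | (a, b, v) :: rest => if a = k.1 ∧ b = k.2 then v else pvGetN rest k

def euler_form_mckay (d1 : List (Int × Int × Int)) (d2 : List (Int × Int × Int)) : Int :=
  -- mckay_quiver_z2z2 inlined: nodes and the three arrow-building loops
  let nodes : List (Int × Int) := [(0, 0), (1, 0), (0, 1), (1, 1)]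
  let arrows : List ((Int × Int) × (Int × Int) × String) :=
    (nodes.map (fun p => ((p.1, p.2), (PySem.Int.mod (p.1 + 1) 2, PySem.Int.mod (p.2 + 1) 2), "x")))
    ++ (nodes.map (fun p => ((p.1, p.2), (PySem.Int.mod (p.1 + 1) 2, p.2), "y")))
    ++ (nodes.map (fun p => ((p.1, p.2), (p.1, PySem.Int.mod (p.2 + 1) 2), "z")))
  let diag := (nodes.map (fun n => pvGetN d1 n * pvGetN d2 n)).sum
  let off := arrows.foldl (fun acc arr => acc + pvGetN d1 arr.1 * pvGetN d2 arr.2.1) 0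
  diag - off

-- ===== PORT B =====
def euler_form_mckay_alt (d1 : List (Int × Int × Int)) (d2 : List (Int × Int × Int)) : Int :=
  let nodes : List (Int × Int) := [(0, 0), (1, 0), (0, 1), (1, 1)]
  let diag := (nodes.map (fun n => pvGetN d1 n * pvGetN d2 n)).sum
  let s1 := (nodes.map (fun n => pvGetN d1 n)).sum
  let s2 := (nodes.map (fun n => pvGetN d2 n)).sum
  2 * diag - s1 * s2

-- ===== PRECONDITION & SPEC =====
def Spec_euler_form_mckay (d1 : List (Int × Int × Int)) (d2 : List (Int × Int × Int)) (out : Int) : Prop := out = euler_form_mckay_alt d1 d2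
instance (d1 : List (Int × Int × Int)) (d2 : List (Int × Int × Int)) (out : Int) : Decidable (Spec_euler_form_mckay d1 d2 out) := by unfold Spec_euler_form_mckay; infer_instance

-- ===== CLAIM (what is proved, stated in full; the proofs are below) =====
def Claim_equal_euler_form_mckay : Prop := ∀ (d1 : List (Int × Int × Int)) (d2 : List (Int × Int × Int)), Dom_euler_form_mckay d1 d2 → Spec_euler_form_mckay d1 d2 (euler_form_mckay d1 d2)

-- ===== LEMMAS AND PROOFS =====

-- ===== VERDICT (by name: the statement is the Claim_ definition above) =====
theorem euler_form_mckay_spec : Claim_equal_euler_form_mckay := by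
  intro d1 d2 _
  unfold Spec_euler_form_mckay euler_form_mckay euler_form_mckay_alt
  simp [PySem.Int.mod, List.foldl, List.map, List.sum]
  ring
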